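-- pv_equiv track=rewrite | github.com/acarrasco/uva | p104/p104.py | add_diagonal
-- ===== SOURCE A (Python) =====
-- def add_diagonal(wod):
-- 	n = len(wod[0]) + 1
-- 	wd = [[1] * n for _ in range(n)]
-- 	for i, row in enumerate(wod):
-- 		for j, v in enumerate(row):
-- 			wdj = j + int(j >= i)
-- 			wd[i][wdj] = v
-- 	return wd
-- ===== SOURCE B (Python) =====
-- def add_diagonal(wod):
--     n = len(wod[0]) + 1
--     wd = [row[:i] + [1] + row[i:] + [1] * (n - 1 - len(row))
--           for i, row in enumerate(wod)]
--     wd += [[1] * n for _ in range(n - len(wod))]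
--     return wd
-- ===== Notes on version B (the rewrite author's own statement) =====
-- stated objective: simpler
-- what changed: Replaces A's pre-built ones-matrix with nested per-element scatter-writes at offset columns by a single per-row slice-splice (row[:i] + [1] + row[i:] + padding) plus appended all-ones rows; bulk slicing also avoids the per-element Python loop (constant-factor speedup).
-- outside the precondition, e.g. on add_diagonal([[], []]): A returns [[1]], B returns [[1], [1]]
import Mathlib
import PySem

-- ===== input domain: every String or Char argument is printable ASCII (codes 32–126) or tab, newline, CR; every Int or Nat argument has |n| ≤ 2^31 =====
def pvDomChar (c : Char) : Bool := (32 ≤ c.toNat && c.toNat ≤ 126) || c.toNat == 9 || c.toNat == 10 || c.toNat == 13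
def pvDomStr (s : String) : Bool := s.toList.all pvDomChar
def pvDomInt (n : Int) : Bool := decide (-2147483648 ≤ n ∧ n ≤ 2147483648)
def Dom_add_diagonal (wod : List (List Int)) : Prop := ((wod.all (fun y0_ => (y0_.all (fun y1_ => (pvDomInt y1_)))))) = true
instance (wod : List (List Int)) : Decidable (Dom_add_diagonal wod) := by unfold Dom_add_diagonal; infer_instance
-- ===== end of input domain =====

-- B replaces A's ones-matrix scatter-write double loop by a per-row slice-splice
-- (row[:i] + [1] + row[i:] + padding) plus appended all-ones rows: a simpler decomposition.

-- ===== PORT A =====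
-- inner loop body: wd[i][wdj] = v  (pySetD/pyGetD are the total forms; exact under Pre_,
-- where every index is in range)
def pvInner (i : Int) (wd : List (List Int)) (q : Int × Int) : List (List Int) :=
  let wdj : Int := q.1 + (if q.1 ≥ i then 1 else 0)
  PySem.List.pySetD wd i (PySem.List.pySetD (PySem.List.pyGetD wd i []) wdj q.2)

-- outer loop body: for j, v in enumerate(row): …
def pvOuterA (wd : List (List Int)) (p : Int × List Int) : List (List Int) :=
  (PySem.List.enumerate p.2 0).foldl (pvInner p.1) wd

-- wod[0] raises IndexError on empty wod (excluded by Pre_); headD is its total form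
def add_diagonal (wod : List (List Int)) : List (List Int) :=
  let n : Int := (wod.headD []).length + 1
  let wd : List (List Int) :=
    (PySem.List.pyRange 0 n 1).map (fun _ => PySem.List.pyRepeat [(1 : Int)] n)
  (PySem.List.enumerate wod 0).foldl pvOuterA wd

-- ===== PORT B =====
-- row[:i] + [1] + row[i:] + [1] * (n - 1 - len(row))
def pvSplice (n : Int) (p : Int × List Int) : List Int :=
  PySem.List.slice p.2 none (some p.1) ++ [(1 : Int)] ++ PySem.List.slice p.2 (some p.1) none
    ++ PySem.List.pyRepeat [(1 : Int)] (n - 1 - p.2.length)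

def add_diagonal_alt (wod : List (List Int)) : List (List Int) :=
  let n : Int := (wod.headD []).length + 1
  ((PySem.List.enumerate wod 0).map (pvSplice n))
    ++ (PySem.List.pyRange 0 (n - wod.length) 1).map (fun _ => PySem.List.pyRepeat [(1 : Int)] n)

-- ===== PRECONDITION & SPEC =====
-- Pre_ excludes matrices with more rows than n = len(wod[0]) + 1: there A raises
-- IndexError unless every extra row is empty, in which case it silently drops the
-- extra rows — an accident of the out-of-range write sitting inside the inner loop.
def Pre_add_diagonal (wod : List (List Int)) : Prop :=
  wod ≠ [] ∧ wod.length ≤ (wod.headD []).length + 1 ∧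
    ∀ row ∈ wod, row.length ≤ (wod.headD []).length
instance (wod : List (List Int)) : Decidable (Pre_add_diagonal wod) := by
  unfold Pre_add_diagonal; infer_instance

def pvWitness_add_diagonal : List (List Int) := [[2, 3], [4, 5]]

def Spec_add_diagonal (wod : List (List Int)) (out : List (List Int)) : Prop := out = add_diagonal_alt wod
instance (wod : List (List Int)) (out : List (List Int)) : Decidable (Spec_add_diagonal wod out) := by unfold Spec_add_diagonal; infer_instance

-- ===== CLAIM (what is proved, stated in full; the proofs are below) =====
def Claim_equal_add_diagonal : Prop := ∀ (wod : List (List Int)), Dom_add_diagonal wod → Pre_add_diagonal wod → Spec_add_diagonal wod (add_diagonal wod)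

-- ===== LEMMAS AND PROOFS =====

def pvRowFold (i : Int) (l : List (Int × Int)) (t : List Int) : List Int :=
  l.foldl (fun t q => PySem.List.pySetD t (q.1 + (if q.1 ≥ i then 1 else 0)) q.2) t

theorem pv_set_mid {α : Type} (P : List α) (k d n : Nat) (e v : α) (hn : n = P.length + d)
    (hd : d < k) :
    (P ++ List.replicate k e).set n v
      = (P ++ List.replicate d e ++ [v]) ++ List.replicate (k - d - 1) e := by
  subst hn
  rw [List.set_append_right _ _ (by omega), Nat.add_sub_cancel_left]
  rw [List.set_eq_take_cons_drop v (by simpa using hd)]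
  simp [List.take_replicate, List.drop_replicate, Nat.min_eq_left (Nat.le_of_lt hd)]
  omega

theorem pvRowFold_hi (i m : Nat) (row : List Int) : ∀ (c : Nat) (P : List Int),
    P.length = c + 1 → i ≤ c → c + 1 + row.length ≤ m + 1 →
    pvRowFold (i : Int) (PySem.List.enumerate row (c : Int))
        (P ++ List.replicate (m - c) (1 : Int))
      = P ++ row ++ List.replicate (m - c - row.length) (1 : Int) := by
  induction row with
  | nil =>
    intro c P hP hic hb
    simp [pvRowFold, PySem.List.enumerate_nil]
  | cons v row ih =>
    intro c P hP hic hb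
    rw [PySem.List.enumerate_cons]
    simp only [pvRowFold, List.foldl_cons]
    rw [if_pos (by exact_mod_cast hic)]
    have hc1 : ((c : Int) + 1) = ((c + 1 : Nat) : Int) := by push_cast; ring
    rw [hc1, PySem.List.pySetD_natCast]
    rw [pv_set_mid P (m - c) 0 (c + 1) 1 v (by omega) (by simp at hb; omega)]
    have hIH := ih (c + 1) (P ++ List.replicate 0 1 ++ [v]) (by simp [hP]) (by omega)
      (by simp at hb ⊢; omega)
    simp only [pvRowFold] at hIH
    rw [show m - c - 0 - 1 = m - (c + 1) from by omega, hIH,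
        show m - (c + 1) - row.length = m - c - (v :: row).length from by simp; omega]
    simp [List.append_assoc]

theorem pvRowFold_lo (i m : Nat) (row : List Int) : ∀ (c : Nat) (P : List Int),
    P.length = c → c ≤ i → i ≤ m → c + row.length ≤ m →
    pvRowFold (i : Int) (PySem.List.enumerate row (c : Int))
        (P ++ List.replicate (m + 1 - c) (1 : Int))
      = if c + row.length ≤ i
        then P ++ row ++ List.replicate (m + 1 - c - row.length) (1 : Int)
        else P ++ row.take (i - c) ++ (1 : Int) :: row.drop (i - c)
              ++ List.replicate (m - c - row.length) (1 : Int) := by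
  induction row with
  | nil =>
    intro c P hP hci him hb
    rw [if_pos (by simpa using hci)]
    simp [pvRowFold, PySem.List.enumerate_nil]
  | cons v row ih =>
    intro c P hP hci him hb
    rw [PySem.List.enumerate_cons]
    simp only [pvRowFold, List.foldl_cons]
    rcases Nat.lt_or_ge c i with hlt | hge
    · -- c < i : write at position c, recurse with c + 1 ≤ i
      rw [if_neg (by simp only [ge_iff_le, Nat.cast_le, not_le]; omega)]
      rw [add_zero, PySem.List.pySetD_natCast]
      rw [pv_set_mid P (m + 1 - c) 0 c 1 v (by omega) (by omega)]
      have hc1 : ((c : Int) + 1) = ((c + 1 : Nat) : Int) := by push_cast; ring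
      rw [hc1]
      have hIH := ih (c + 1) (P ++ List.replicate 0 1 ++ [v]) (by simp [hP]) (by omega) him
        (by simp at hb ⊢; omega)
      simp only [pvRowFold] at hIH
      rw [show m + 1 - c - 0 - 1 = m + 1 - (c + 1) from by omega, hIH]
      by_cases hc2 : c + 1 + row.length ≤ i
      · rw [if_pos hc2, if_pos (by simp; omega),
            show m + 1 - (c + 1) - row.length = m + 1 - c - (v :: row).length from by simp; omega]
        simp [List.append_assoc]
      · rw [if_neg hc2, if_neg (by simp; omega)]
        rw [show i - c = (i - (c + 1)) + 1 from by omega]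
        simp only [List.take_succ_cons, List.drop_succ_cons]
        rw [show m - (c + 1) - row.length = m - c - (v :: row).length from by simp; omega]
        simp [List.append_assoc]
    · -- c = i (forced): diagonal hit, write at c + 1, rest via pvRowFold_hi
      rw [if_pos (by exact_mod_cast hge)]
      have hc1 : ((c : Int) + 1) = ((c + 1 : Nat) : Int) := by push_cast; ring
      rw [hc1, PySem.List.pySetD_natCast]
      rw [pv_set_mid P (m + 1 - c) 1 (c + 1) 1 v (by omega) (by simp at hb; omega)]
      have hHI := pvRowFold_hi i m row (c + 1) (P ++ List.replicate 1 1 ++ [v])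
        (by simp [hP]) (by omega) (by simp at hb ⊢; omega)
      simp only [pvRowFold] at hHI
      rw [show m + 1 - c - 1 - 1 = m - (c + 1) from by omega, hHI]
      rw [if_neg (by simp; omega)]
      rw [show i - c = 0 from by omega,
          show m - (c + 1) - row.length = m - c - (v :: row).length from by simp; omega]
      simp [List.append_assoc]

-- the outer fold body touches only row i of wd
theorem pv_comm (g : Int × Int → List Int → List Int) :
    ∀ (l : List (Int × Int)) (i : Nat) (wd : List (List Int)), i < wd.length →
    l.foldl (fun wd q => wd.set i (g q (wd.getD i []))) wd
      = wd.set i (l.foldl (fun t q => g q t) (wd.getD i [])) := by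
  intro l
  induction l with
  | nil =>
    intro i wd hi
    rw [List.getD, List.getElem?_eq_getElem hi]
    simp
  | cons q l ih =>
    intro i wd hi
    simp only [List.foldl_cons]
    rw [ih i _ (by simpa using hi)]
    have : (wd.set i (g q (wd.getD i []))).getD i [] = g q (wd.getD i []) := by
      simp [List.getD, hi]
    rw [this, List.set_set]

theorem pvOuterA_eq_set (row : List Int) (i : Nat) (wd : List (List Int))
    (hi : i < wd.length) :
    pvOuterA wd ((i : Int), row)
      = wd.set i (pvRowFold (i : Int) (PySem.List.enumerate row 0) (wd.getD i [])) := by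
  unfold pvOuterA pvRowFold
  have hfun : pvInner ((i : Nat) : Int) = fun wd q =>
      wd.set i (PySem.List.pySetD (wd.getD i [])
        (q.1 + (if q.1 ≥ ((i : Nat) : Int) then 1 else 0)) q.2) := by
    funext wd q
    simp [pvInner, PySem.List.pySetD_natCast, PySem.List.pyGetD_natCast]
  rw [hfun]
  exact pv_comm (fun q t => PySem.List.pySetD t (q.1 + (if q.1 ≥ (i : Int) then 1 else 0)) q.2)
    _ i wd hi

-- on an all-ones row of length m + 1 the inner loop produces exactly B's splice
theorem pvRowFold_splice (i m : Nat) (row : List Int)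
    (him : i ≤ m) (hrm : row.length ≤ m) :
    pvRowFold (i : Int) (PySem.List.enumerate row 0) (List.replicate (m + 1) (1 : Int))
      = pvSplice ((m : Int) + 1) ((i : Int), row) := by
  have h0 := pvRowFold_lo i m row 0 [] rfl (Nat.zero_le _) him (by omega)
  simp only [Nat.sub_zero, Nat.zero_add, List.nil_append, Nat.cast_zero] at h0
  rw [h0]
  unfold pvSplice
  simp only [PySem.List.slice_to_natCast, PySem.List.slice_from_natCast,
    PySem.List.pyRepeat_singleton]
  have hrep : ((m : Int) + 1 - 1 - (row.length : Int)).toNat = m - row.length := by omega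
  rw [hrep]
  by_cases hc : row.length ≤ i
  · rw [if_pos hc, List.take_of_length_le hc, List.drop_eq_nil_of_le hc,
        show m + 1 - row.length = (m - row.length) + 1 from by omega, List.replicate_succ]
    simp
  · rw [if_neg hc]
    simp

-- outer loop invariant: spliced prefix S, all-ones suffix
theorem pvOuter_inv (m : Nat) (ws : List (List Int)) : ∀ (k : Nat) (S : List (List Int)),
    S.length = k → (∀ row ∈ ws, row.length ≤ m) → k + ws.length ≤ m + 1 →
    (PySem.List.enumerate ws (k : Int)).foldl pvOuterA
        (S ++ List.replicate (m + 1 - k) (List.replicate (m + 1) (1 : Int)))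
      = S ++ (PySem.List.enumerate ws (k : Int)).map (pvSplice ((m : Int) + 1))
          ++ List.replicate (m + 1 - k - ws.length) (List.replicate (m + 1) (1 : Int)) := by
  induction ws with
  | nil =>
    intro k S hS hrows hk
    simp [PySem.List.enumerate_nil]
  | cons row ws ih =>
    intro k S hS hrows hk
    have hk' : k + ws.length + 1 ≤ m + 1 := by simp at hk; omega
    rw [PySem.List.enumerate_cons]
    simp only [List.foldl_cons, List.map_cons]
    have hklen : k < (S ++ List.replicate (m + 1 - k) (List.replicate (m + 1) (1 : Int))).length := by
      simp [hS]; omega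
    rw [pvOuterA_eq_set row k _ hklen]
    have hget : (S ++ List.replicate (m + 1 - k) (List.replicate (m + 1) (1 : Int))).getD k []
        = List.replicate (m + 1) (1 : Int) := by
      rw [List.getD_append_right _ _ _ _ (by omega), hS, Nat.sub_self]
      rw [show m + 1 - k = (m - k) + 1 from by omega, List.replicate_succ]
      simp
    rw [hget, pvRowFold_splice k m row (by omega) (hrows row (by simp))]
    rw [pv_set_mid S (m + 1 - k) 0 k (List.replicate (m + 1) (1 : Int))
          (pvSplice ((m : Int) + 1) ((k : Int), row)) (by omega) (by omega)]
    simp only [List.replicate_zero, List.append_nil]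
    have hIH := ih (k + 1) (S ++ [pvSplice ((m : Int) + 1) ((k : Int), row)])
      (by simp [hS]) (fun r hr => hrows r (by simp [hr])) (by omega)
    rw [show ((k : Int) + 1) = ((k + 1 : Nat) : Int) from by push_cast; ring,
        show m + 1 - k - 0 - 1 = m + 1 - (k + 1) from by omega, hIH]
    rw [show m + 1 - (k + 1) - ws.length = m + 1 - k - (row :: ws).length from by simp; omega]
    simp [List.append_assoc]

-- ===== VERDICT (by name: the statement is the Claim_ definition above) =====
theorem add_diagonal_spec : Claim_equal_add_diagonal := by
  intro wod _ hpre
  obtain ⟨hne, hlen, hrows⟩ := hpre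
  unfold Spec_add_diagonal add_diagonal add_diagonal_alt
  simp only []
  set m := (wod.headD []).length with hm
  have hinit : (PySem.List.pyRange 0 ((m : Int) + 1) 1).map
        (fun _ => PySem.List.pyRepeat [(1 : Int)] ((m : Int) + 1))
      = List.replicate (m + 1) (List.replicate (m + 1) (1 : Int)) := by
    rw [List.eq_replicate_iff]
    constructor
    · simp [PySem.List.length_pyRange_one]
      try omega
    · intro b hb
      simp only [List.mem_map] at hb
      obtain ⟨x, _, hx⟩ := hb
      rw [← hx, PySem.List.pyRepeat_singleton]
      congr 1
      try omega
  have hpad : (PySem.List.pyRange 0 ((m : Int) + 1 - (wod.length : Int)) 1).map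
        (fun _ => PySem.List.pyRepeat [(1 : Int)] ((m : Int) + 1))
      = List.replicate (m + 1 - wod.length) (List.replicate (m + 1) (1 : Int)) := by
    rw [List.eq_replicate_iff]
    constructor
    · simp [PySem.List.length_pyRange_one]
      try omega
    · intro b hb
      simp only [List.mem_map] at hb
      obtain ⟨x, _, hx⟩ := hb
      rw [← hx, PySem.List.pyRepeat_singleton]
      congr 1
      try omega
  rw [hinit, hpad]
  have hinv := pvOuter_inv m wod 0 [] rfl hrows (by omega)
  simp only [Nat.cast_zero, Nat.sub_zero, List.nil_append] at hinv
  rw [hinv]
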